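-- pv_equiv track=rewrite | github.com/tzk524/396_online_markets_project_2 | generator.py | best_in_hindsight_helper
-- ===== SOURCE A (Python) =====
-- def best_in_hindsight_helper(action, value, draws):
--     payoff = 0
--     for d in draws:
--         if action > d:
--             payoff += value - action
--         elif action <= d:
--             payoff += 0
--     return payoff
-- ===== SOURCE B (Python) =====
-- def best_in_hindsight_helper(action, value, draws):
--     count = 0
--     for d in sorted(draws):
--         if d >= action:
--             break
--         count += 1
--     return (value - action) * count
-- ===== Notes on version B (the rewrite author's own statement) =====
-- stated objective: alternative
-- what changed: Sorts the draws first, counts the below-action prefix with an early-break scan (valid because sorting puts every draw < action before every draw >= action), and returns the single product (value - action) * count instead of accumulating the payoff term by term over the unsorted list.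
import Mathlib
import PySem

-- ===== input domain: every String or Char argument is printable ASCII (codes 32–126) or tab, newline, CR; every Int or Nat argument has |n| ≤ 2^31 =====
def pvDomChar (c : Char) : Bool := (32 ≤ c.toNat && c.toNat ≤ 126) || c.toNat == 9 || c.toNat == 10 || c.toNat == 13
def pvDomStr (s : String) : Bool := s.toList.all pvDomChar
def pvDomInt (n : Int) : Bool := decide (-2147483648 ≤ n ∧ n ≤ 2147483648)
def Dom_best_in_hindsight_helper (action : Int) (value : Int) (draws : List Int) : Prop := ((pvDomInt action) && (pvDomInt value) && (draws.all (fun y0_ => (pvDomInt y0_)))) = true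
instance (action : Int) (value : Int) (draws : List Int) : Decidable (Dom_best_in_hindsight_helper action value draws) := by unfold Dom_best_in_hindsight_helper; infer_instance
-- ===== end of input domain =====

-- B sorts the draws and counts the below-action prefix with an early break, then returns one product (objective: alternative).


-- ===== PORT A =====
-- loop: payoff starts at 0; each draw adds value - action if action > d, else adds 0
def best_in_hindsight_helper (action : Int) (value : Int) (draws : List Int) : Int :=
  draws.foldl (fun payoff d =>
    if action > d then payoff + (value - action)
    else if action ≤ d then payoff + 0
    else payoff) 0

-- ===== PORT B =====
-- sort the draws; scan the sorted list counting, breaking at the first d ≥ action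
-- (the for-loop with break is the prefix scan List.takeWhile); return the single product
def best_in_hindsight_helper_alt (action : Int) (value : Int) (draws : List Int) : Int :=
  let s := PySem.List.sorted draws (fun d => d) false
  let count := (s.takeWhile (fun d => decide (¬ d ≥ action))).length
  (value - action) * (count : Int)

-- ===== PRECONDITION & SPEC =====
def Spec_best_in_hindsight_helper (action : Int) (value : Int) (draws : List Int) (out : Int) : Prop := out = best_in_hindsight_helper_alt action value draws
instance (action : Int) (value : Int) (draws : List Int) (out : Int) : Decidable (Spec_best_in_hindsight_helper action value draws out) := by unfold Spec_best_in_hindsight_helper; infer_instance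

-- ===== CLAIM (what is proved, stated in full; the proofs are below) =====
def Claim_equal_best_in_hindsight_helper : Prop := ∀ (action : Int) (value : Int) (draws : List Int), Dom_best_in_hindsight_helper action value draws → Spec_best_in_hindsight_helper action value draws (best_in_hindsight_helper action value draws)

-- ===== LEMMAS AND PROOFS =====
-- A's fold counts the draws below action, each contributing value - action
theorem bih_foldl_shift (action value : Int) (draws : List Int) (acc : Int) :
    draws.foldl (fun payoff d =>
      if action > d then payoff + (value - action)
      else if action ≤ d then payoff + 0
      else payoff) acc
    = acc + (value - action) * (draws.countP (fun d => decide (d < action)) : Int) := by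
  induction draws generalizing acc with
  | nil => simp
  | cons h t ih =>
    simp only [List.foldl_cons, List.countP_cons]
    by_cases hd : h < action
    · rw [if_pos (show action > h from hd), ih]
      simp only [hd, decide_true, if_true]
      push_cast
      ring
    · rw [if_neg (show ¬ action > h by omega), if_pos (show action ≤ h by omega), ih]
      simp [hd]

-- on a ≤-sorted list, the below-action prefix is exactly the below-action elements
theorem takeWhile_eq_filter_of_pairwise (action : Int) (s : List Int)
    (hs : s.Pairwise (fun a b => a ≤ b)) :
    s.takeWhile (fun d => decide (¬ d ≥ action)) = s.filter (fun d => decide (d < action)) := by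
  induction s with
  | nil => rfl
  | cons h t ih =>
    rcases List.pairwise_cons.mp hs with ⟨hh, ht⟩
    by_cases hd : h < action
    · simp only [List.takeWhile_cons, List.filter_cons]
      rw [if_pos (by simpa using (by omega : ¬ h ≥ action)), if_pos (by simpa using hd), ih ht]
    · simp only [List.takeWhile_cons, List.filter_cons]
      rw [if_neg (by simpa using (by omega : ¬ ¬ h ≥ action)), if_neg (by simpa using hd)]
      have : t.filter (fun d => decide (d < action)) = [] := by
        apply List.filter_eq_nil_iff.mpr
        intro y hy
        have := hh y hy
        simp only [decide_eq_true_eq]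
        omega
      simp [this]

-- ===== VERDICT (by name: the statement is the Claim_ definition above) =====
theorem best_in_hindsight_helper_spec : Claim_equal_best_in_hindsight_helper := by
  intro action value draws _
  unfold Spec_best_in_hindsight_helper best_in_hindsight_helper best_in_hindsight_helper_alt
  have hperm : (PySem.List.sorted draws (fun d => d) false).Perm draws :=
    PySem.List.sorted_perm ..
  simp only [bih_foldl_shift,
    takeWhile_eq_filter_of_pairwise action _ (by simpa using PySem.List.sorted_pairwise draws (fun d => d)),
    ← List.countP_eq_length_filter, hperm.countP_eq]
  ring
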